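-- pv_equiv track=rewrite | github.com/thibaut1998e/Graph_signal_processing | sum_bandwidth_2.py | edges_lower_bound
-- ===== SOURCE A (Python) =====
-- def compute_edges(weights) :
--     edges = []
--     for i in range(len(weights)) :
--         for j in range(i) :
--             if weights[i][j] != 0 :
--                 edges.append((i, j))
--     return edges
--
-- def edges_lower_bound(weights) :
--     n = len(weights)
--     edges = compute_edges(weights)
--     m = len(edges)
--     bound = 0
--     remaining_edges = m
--     difference = 1
--     while remaining_edges > n - difference :
--         bound += (n - difference) * difference
--         remaining_edges -= (n - difference)
--         difference += 1
--     bound += remaining_edges * difference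
--     return bound
-- ===== SOURCE B (Python) =====
-- def edges_lower_bound(weights):
--     n = len(weights)
--     m = sum(1 for i in range(n) for j in range(i) if weights[i][j] != 0)
--     # largest k in [0, n-1] with k*n - k*(k+1)//2 < m, by binary search
--     lo, hi = 0, n - 1
--     while lo < hi:
--         mid = (lo + hi + 1) // 2
--         if mid * n - mid * (mid + 1) // 2 < m:
--             lo = mid
--         else:
--             hi = mid - 1
--     k = lo
--     cap = k * n - k * (k + 1) // 2
--     return (3 * n - 2 * k - 1) * k * (k + 1) // 6 + (m - cap) * (k + 1)
-- ===== Notes on version B (the rewrite author's own statement) =====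
-- stated objective: alternative
-- what changed: Replaces A's iterative band-filling while-loop by a binary search for the number k of full bands plus closed-form arithmetic-series formulas, and counts nonzero lower-triangle entries directly instead of materialising an edge list.
import Mathlib
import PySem

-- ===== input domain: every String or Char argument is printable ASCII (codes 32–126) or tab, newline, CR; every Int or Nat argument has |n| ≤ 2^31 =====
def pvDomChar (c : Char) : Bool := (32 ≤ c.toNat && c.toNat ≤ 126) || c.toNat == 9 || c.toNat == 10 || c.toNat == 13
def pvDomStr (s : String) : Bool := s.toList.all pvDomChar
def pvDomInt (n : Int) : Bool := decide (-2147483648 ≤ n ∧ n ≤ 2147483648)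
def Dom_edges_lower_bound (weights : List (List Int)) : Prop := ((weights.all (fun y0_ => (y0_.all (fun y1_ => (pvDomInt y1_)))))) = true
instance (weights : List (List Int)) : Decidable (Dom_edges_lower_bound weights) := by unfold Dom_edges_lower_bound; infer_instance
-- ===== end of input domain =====

-- B replaces A's iterative band-filling loop by a binary search for the number of full
-- bands plus closed-form series formulas (objective: alternative; return value only).

-- ===== PORT A =====
-- compute_edges: nested index loops collecting (i, j) pairs with weights[i][j] != 0
def computeEdgesA (weights : List (List Int)) : List (Int × Int) :=
  (PySem.List.pyRange 0 (weights.length : Int) 1).foldl (fun edges i =>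
    (PySem.List.pyRange 0 i 1).foldl (fun edges j =>
      if PySem.List.pyGetD (PySem.List.pyGetD weights i []) j 0 ≠ 0 then edges ++ [(i, j)]
      else edges) edges) []

-- the while loop of A, fuel-guarded (fuel only makes it total; under Pre_ it never runs out)
def lbLoopA (n : Int) : Nat → Int → Int → Int → Int
  | 0, bound, remaining, difference => bound + remaining * difference
  | fuel + 1, bound, remaining, difference =>
    if remaining > n - difference then
      lbLoopA n fuel (bound + (n - difference) * difference) (remaining - (n - difference))
        (difference + 1)
    else bound + remaining * difference

def edges_lower_bound (weights : List (List Int)) : Int :=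
  let n : Int := (weights.length : Int)
  let edges := computeEdgesA weights
  let m : Int := (edges.length : Int)
  lbLoopA n weights.length 0 m 1

-- ===== PORT B =====
-- binary search for the largest k in [lo, hi] with k*n - k*(k+1)//2 < m
-- (fuel-guarded; fuel (hi-lo).toNat suffices since the interval shrinks each step)
def bandSearch (n m : Int) : Nat → Int → Int → Int
  | 0, lo, _ => lo
  | fuel + 1, lo, hi =>
    if lo < hi then
      let mid := PySem.Int.floordiv (lo + hi + 1) 2
      if mid * n - PySem.Int.floordiv (mid * (mid + 1)) 2 < m then bandSearch n m fuel mid hi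
      else bandSearch n m fuel lo (mid - 1)
    else lo

def edges_lower_bound_alt (weights : List (List Int)) : Int :=
  let n : Int := (weights.length : Int)
  -- m = sum(1 for i in range(n) for j in range(i) if weights[i][j] != 0)
  let m : Int := ((PySem.List.pyRange 0 n 1).map (fun i =>
    (((PySem.List.pyRange 0 i 1).countP
      (fun j => PySem.List.pyGetD (PySem.List.pyGetD weights i []) j 0 != 0) : Nat) : Int))).sum
  let k := bandSearch n m (n - 1).toNat 0 (n - 1)
  let cap := k * n - PySem.Int.floordiv (k * (k + 1)) 2
  PySem.Int.floordiv ((3 * n - 2 * k - 1) * k * (k + 1)) 6 + (m - cap) * (k + 1)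

-- ===== PRECONDITION & SPEC =====
-- Pre_ excludes the empty matrix, on which A's while loop never terminates, and ragged
-- matrices where some row i has fewer than i entries, on which A raises IndexError.
def Pre_edges_lower_bound (weights : List (List Int)) : Prop :=
  weights ≠ [] ∧ ∀ i, (h : i < weights.length) → i ≤ weights[i].length
instance (weights : List (List Int)) : Decidable (Pre_edges_lower_bound weights) := by
  unfold Pre_edges_lower_bound; infer_instance

def pvWitness_edges_lower_bound : List (List Int) := [[0], [5, 0], [1, 2, 0]]

def Spec_edges_lower_bound (weights : List (List Int)) (out : Int) : Prop :=
  out = edges_lower_bound_alt weights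
instance (weights : List (List Int)) (out : Int) : Decidable (Spec_edges_lower_bound weights out) := by
  unfold Spec_edges_lower_bound; infer_instance

-- ===== CLAIM (what is proved, stated in full; the proofs are below) =====
def Claim_equal_edges_lower_bound : Prop := ∀ (weights : List (List Int)), Dom_edges_lower_bound weights → Pre_edges_lower_bound weights → Spec_edges_lower_bound weights (edges_lower_bound weights)

-- ===== LEMMAS AND PROOFS =====

-- twice the capacity of the first d bands: 2*(d*n - d*(d+1)/2)
def capB (n d : Int) : Int := 2 * (d * n) - d * (d + 1)

-- partial sums, indexed by the number of completed bands
def Scap (n : Int) : Nat → Int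
  | 0 => 0
  | i + 1 => Scap n i + (n - ((i : Int) + 1))

def Gsum (n : Int) : Nat → Int
  | 0 => 0
  | i + 1 => Gsum n i + (n - ((i : Int) + 1)) * ((i : Int) + 1)

lemma Scap2 (n : Int) (i : Nat) : 2 * Scap n i = capB n (i : Int) := by
  induction i with
  | zero => simp [Scap, capB]
  | succ i ih => rw [Scap]; unfold capB at *; push_cast; linear_combination ih

lemma Gsum6 (n : Int) (i : Nat) :
    6 * Gsum n i = (3 * n - 2 * (i : Int) - 1) * (i : Int) * ((i : Int) + 1) := by
  induction i with
  | zero => simp [Gsum]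
  | succ i ih => rw [Gsum]; push_cast; linear_combination ih

lemma half_mul_succ (d : Int) : 2 * PySem.Int.floordiv (d * (d + 1)) 2 = d * (d + 1) := by
  have h : Even (d * (d + 1)) := Int.even_mul_succ_self d
  rw [PySem.Int.floordiv_eq_ediv_of_pos (by norm_num)]
  rcases h with ⟨c, hc⟩
  omega

lemma floordiv_six (x : Int) : PySem.Int.floordiv (6 * x) 6 = x := by
  rw [PySem.Int.floordiv_eq_ediv_of_pos (by norm_num)]
  exact Int.mul_ediv_cancel_left x (by norm_num)

-- capacity is monotone on [0, n-1]
lemma capB_mono (n d k : Int) (_hd0 : 0 ≤ d) (hdk : d ≤ k) (hk : k ≤ n - 1) :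
    capB n d ≤ capB n k := by
  unfold capB
  nlinarith [_hd0, mul_nonneg (sub_nonneg.2 hdk) (by omega : (0 : Int) ≤ 2 * n - (k + d + 1))]

lemma bandSearch_spec (n m : Int) (_hm0 : 0 ≤ m) (h2 : 2 * m ≤ n * (n - 1)) :
    ∀ fuel : Nat, ∀ lo hi : Int, (hi - lo).toNat ≤ fuel → 0 ≤ lo → hi ≤ n - 1 → lo ≤ hi →
    (lo = 0 ∨ capB n lo < 2 * m) → (hi = n - 1 ∨ ¬ capB n (hi + 1) < 2 * m) →
    lo ≤ bandSearch n m fuel lo hi ∧ bandSearch n m fuel lo hi ≤ hi ∧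
      (bandSearch n m fuel lo hi = 0 ∨ capB n (bandSearch n m fuel lo hi) < 2 * m) ∧
      ¬ capB n (bandSearch n m fuel lo hi + 1) < 2 * m := by
  intro fuel
  induction fuel with
  | zero =>
    intro lo hi hfuel _ hhi hlh hP hQ
    have hlo_hi : lo = hi := by omega
    subst hlo_hi
    refine ⟨le_refl _, le_refl _, ?_, ?_⟩
    · simpa [bandSearch] using hP
    · simp only [bandSearch]
      rcases hQ with h | h
      · subst h; unfold capB; nlinarith
      · exact h
  | succ fuel ih =>
    intro lo hi hfuel hlo hhi hlh hP hQ
    by_cases hlt : lo < hi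
    · have hd : PySem.Int.floordiv (lo + hi + 1) 2 = (lo + hi + 1) / 2 :=
        PySem.Int.floordiv_eq_ediv_of_pos (by norm_num)
      have hmid_bounds : lo + 1 ≤ (lo + hi + 1) / 2 ∧ (lo + hi + 1) / 2 ≤ hi := by omega
      have hcond : ((lo + hi + 1) / 2) * n -
            PySem.Int.floordiv (((lo + hi + 1) / 2) * ((lo + hi + 1) / 2 + 1)) 2 < m ↔
          capB n ((lo + hi + 1) / 2) < 2 * m := by
        have he := half_mul_succ ((lo + hi + 1) / 2)
        unfold capB
        constructor <;> intro h <;> nlinarith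
      rw [bandSearch]
      simp only [if_pos hlt, hd]
      by_cases hc : capB n ((lo + hi + 1) / 2) < 2 * m
      · rw [if_pos (hcond.mpr hc)]
        have := ih ((lo + hi + 1) / 2) hi (by omega) (by omega) hhi (by omega)
          (Or.inr hc) hQ
        exact ⟨by omega, this.2.1, this.2.2⟩
      · rw [if_neg (fun h => hc (hcond.mp h))]
        have := ih lo ((lo + hi + 1) / 2 - 1) (by omega) hlo (by omega) (by omega) hP
          (Or.inr (by simpa using hc))
        exact ⟨this.1, by omega, this.2.2⟩
    · have hlo_hi : lo = hi := by omega
      subst hlo_hi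
      rw [bandSearch, if_neg hlt]
      refine ⟨le_refl _, le_refl _, hP, ?_⟩
      rcases hQ with h | h
      · subst h; unfold capB; nlinarith
      · exact h

lemma lbLoopA_eq (n m : Int) (K : Nat)
    (hnP : ¬ capB n ((K : Int) + 1) < 2 * m)
    (hP : ∀ j : Nat, 1 ≤ j → j ≤ K → capB n (j : Int) < 2 * m) :
    ∀ fuel i : Nat, ∀ bound : Int, i ≤ K → K - i ≤ fuel →
    lbLoopA n fuel bound (m - Scap n i) ((i : Int) + 1) =
      bound + (Gsum n K - Gsum n i) + (m - Scap n K) * ((K : Int) + 1) := by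
  intro fuel
  induction fuel with
  | zero =>
    intro i bound hiK hfuel
    have : i = K := by omega
    subst this
    simp [lbLoopA]
  | succ fuel ih =>
    intro i bound hiK hfuel
    have hs := Scap2 n i
    have hkey : capB n ((i : Int) + 1) = 2 * Scap n i + 2 * n - 2 * (i : Int) - 2 := by
      unfold capB at hs ⊢
      linear_combination -hs
    rcases Nat.lt_or_ge i K with hlt | hge
    · -- loop continues: capB n (i+1) < 2m
      have hc : capB n ((i : Int) + 1) < 2 * m := by
        have h1 := hP (i + 1) (by omega) (by omega)
        exact_mod_cast h1
      rw [hkey] at hc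
      have hcond : m - Scap n i > n - ((i : Int) + 1) := by linarith
      rw [lbLoopA, if_pos hcond]
      have hstate : m - Scap n i - (n - ((i : Int) + 1)) = m - Scap n (i + 1) := by
        rw [Scap]; ring
      have hd2 : ((i : Int) + 1) + 1 = ((i + 1 : Nat) : Int) + 1 := by push_cast; ring
      rw [hstate, hd2]
      rw [ih (i + 1) (bound + (n - ((i : Int) + 1)) * ((i : Int) + 1)) (by omega) (by omega)]
      rw [Gsum]
      ring
    · -- loop stops: i = K
      have hik : i = K := by omega
      subst hik
      rw [hkey] at hnP
      have hcond : ¬ (m - Scap n i > n - ((i : Int) + 1)) := by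
        intro h
        exact hnP (by linarith)
      rw [lbLoopA, if_neg hcond]
      ring

-- A's edge-list length equals B's direct nonzero count
lemma count_eq (weights : List (List Int)) :
    ((computeEdgesA weights).length : Int) =
      ((PySem.List.pyRange 0 (weights.length : Int) 1).map (fun i =>
        (((PySem.List.pyRange 0 i 1).countP
          (fun j => PySem.List.pyGetD (PySem.List.pyGetD weights i []) j 0 != 0) : Nat) : Int))).sum := by
  have h1 : computeEdgesA weights =
      (PySem.List.pyRange 0 (weights.length : Int) 1).flatMap (fun i =>
        ((PySem.List.pyRange 0 i 1).filter
          (fun j => decide (PySem.List.pyGetD (PySem.List.pyGetD weights i []) j 0 ≠ 0))).map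
          (fun j => ((i, j) : Int × Int))) := by
    unfold computeEdgesA
    simp only [PySem.List.foldl_append_ite]
    rw [PySem.List.foldl_append_eq_flatMap]
    simp
  rw [h1, List.length_flatMap, Nat.cast_list_sum, List.map_map]
  congr 1
  apply List.map_congr_left
  intro i _
  simp only [Function.comp_apply, List.length_map, ← List.countP_eq_length_filter]
  congr 1
  apply List.countP_congr
  intro j _
  simp [bne_iff_ne]

-- bounds on B's count m: 0 ≤ m and 2m ≤ n(n-1)
lemma sum_pyRange_id (L : Nat) :
    2 * (PySem.List.pyRange 0 (L : Int) 1).sum = (L : Int) * ((L : Int) - 1) := by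
  induction L with
  | zero => simp
  | succ L ih =>
    have hcast : ((L + 1 : Nat) : Int) = (L : Int) + 1 := by push_cast; ring
    rw [hcast, PySem.List.pyRange_one_succ_right (by positivity), List.sum_append]
    simp only [List.sum_cons, List.sum_nil]
    linear_combination ih

lemma count_bounds (weights : List (List Int)) :
    0 ≤ ((PySem.List.pyRange 0 (weights.length : Int) 1).map (fun i =>
        (((PySem.List.pyRange 0 i 1).countP
          (fun j => PySem.List.pyGetD (PySem.List.pyGetD weights i []) j 0 != 0) : Nat) : Int))).sum ∧
    2 * ((PySem.List.pyRange 0 (weights.length : Int) 1).map (fun i =>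
        (((PySem.List.pyRange 0 i 1).countP
          (fun j => PySem.List.pyGetD (PySem.List.pyGetD weights i []) j 0 != 0) : Nat) : Int))).sum ≤
      (weights.length : Int) * ((weights.length : Int) - 1) := by
  constructor
  · apply List.sum_nonneg
    intro x hx
    simp only [List.mem_map] at hx
    obtain ⟨p, _, rfl⟩ := hx
    positivity
  · have hle : ((PySem.List.pyRange 0 (weights.length : Int) 1).map (fun i =>
        (((PySem.List.pyRange 0 i 1).countP
          (fun j => PySem.List.pyGetD (PySem.List.pyGetD weights i []) j 0 != 0) : Nat) : Int))).sum ≤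
        (PySem.List.pyRange 0 (weights.length : Int) 1).sum := by
      have := List.sum_le_sum (l := PySem.List.pyRange 0 (weights.length : Int) 1)
        (f := fun i => (((PySem.List.pyRange 0 i 1).countP
          (fun j => PySem.List.pyGetD (PySem.List.pyGetD weights i []) j 0 != 0) : Nat) : Int))
        (g := id) ?_
      · simpa using this
      · intro i hi
        rw [PySem.List.mem_pyRange_one] at hi
        obtain ⟨hi0, hiL⟩ := hi
        simp only [id_eq]
        have hc : (PySem.List.pyRange 0 i 1).countP
            (fun j => PySem.List.pyGetD (PySem.List.pyGetD weights i []) j 0 != 0) ≤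
            (PySem.List.pyRange 0 i 1).length := List.countP_le_length
        rw [PySem.List.length_pyRange_one] at hc
        omega
    have := sum_pyRange_id weights.length
    omega

-- ===== VERDICT (by name: the statement is the Claim_ definition above) =====
theorem edges_lower_bound_spec : Claim_equal_edges_lower_bound := by
  intro weights _ hpre
  unfold Spec_edges_lower_bound
  simp only [edges_lower_bound, edges_lower_bound_alt]
  set n : Int := (weights.length : Int) with hn
  set m : Int := ((PySem.List.pyRange 0 n 1).map (fun i =>
    (((PySem.List.pyRange 0 i 1).countP
      (fun j => PySem.List.pyGetD (PySem.List.pyGetD weights i []) j 0 != 0) : Nat) : Int))).sum with hmdef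
  obtain ⟨hne, _⟩ := hpre
  have hn1 : 1 ≤ n := by
    have : 0 < weights.length := List.length_pos_of_ne_nil hne
    omega
  obtain ⟨hm0, hm2⟩ := count_bounds weights
  rw [← hn, ← hmdef] at hm0 hm2
  have hmeq : ((computeEdgesA weights).length : Int) = m := by
    rw [hmdef, hn]; exact count_eq weights
  set k : Int := bandSearch n m (n - 1).toNat 0 (n - 1) with hk
  have hbs := bandSearch_spec n m hm0 (by linarith) (n - 1).toNat 0 (n - 1)
    (by omega) (le_refl 0) (le_refl _) (by omega) (Or.inl rfl) (Or.inl rfl)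
  rw [← hk] at hbs
  obtain ⟨hk0, hk1, hkP, hkQ⟩ := hbs
  set K : Nat := k.toNat with hK
  have hkK : (K : Int) = k := Int.toNat_of_nonneg hk0
  -- A's loop value
  have hloop := lbLoopA_eq n m K (by rw [hkK]; exact hkQ)
    (fun j hj1 hjK => by
      rcases hkP with h0 | h
      · omega
      · have := capB_mono n (j : Int) k (by positivity) (by omega) hk1
        linarith)
    weights.length 0 0 (by omega) (by omega)
  simp only [Scap, Gsum, Nat.cast_zero, sub_zero] at hloop
  norm_num at hloop
  rw [hmeq, hloop]
  -- B's closed form equals Gsum/Scap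
  have hcap : k * n - PySem.Int.floordiv (k * (k + 1)) 2 = Scap n K := by
    have h1 := half_mul_succ k
    have h2 := Scap2 n K
    rw [hkK] at h2
    unfold capB at h2
    omega
  have hgs : PySem.Int.floordiv ((3 * n - 2 * k - 1) * k * (k + 1)) 6 = Gsum n K := by
    have h6 := Gsum6 n K
    rw [hkK] at h6
    rw [← h6, floordiv_six]
  rw [hcap, hgs, hkK]
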